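-- pv_equiv track=rewrite | github.com/AlekVernelenUCLL/coursematerial_2425_AV | 07-tuples/11-assignment-heatwave/student.py | heatwave
-- ===== SOURCE A (Python) =====
-- def heatwave(temperatures):
--     count25 = 0
--     count30 = 0
--     for temp in temperatures:
--         if count25 >= 5 and count30 >=3:
--             return True
--         else:
--             if 25 <= temp < 30:
--                 count25 += 1
--             elif temp >= 30:
--                 count25 += 1
--                 count30 += 1
--             else:
--                 count25 = 0
--                 count30 = 0
--     if count25 >= 5 and count30 >=3:
--         return True
--     return False
-- ===== SOURCE B (Python) =====
-- from itertools import groupby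
--
-- def heatwave(temperatures):
--     return any(
--         len(run) >= 5 and sum(1 for t in run if t >= 30) >= 3
--         for is_hot, grp in groupby(temperatures, key=lambda t: t >= 25)
--         if is_hot
--         for run in [list(grp)]
--     )
-- ===== Notes on version B (the rewrite author's own statement) =====
-- stated objective: simpler
-- what changed: Replaced the dual-counter scan with explicit resets and an early return by a groupby decomposition: split the temperatures into maximal runs of consecutive hot (>=25) days and check any run for length >= 5 and at least 3 days >= 30.
import Mathlib
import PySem

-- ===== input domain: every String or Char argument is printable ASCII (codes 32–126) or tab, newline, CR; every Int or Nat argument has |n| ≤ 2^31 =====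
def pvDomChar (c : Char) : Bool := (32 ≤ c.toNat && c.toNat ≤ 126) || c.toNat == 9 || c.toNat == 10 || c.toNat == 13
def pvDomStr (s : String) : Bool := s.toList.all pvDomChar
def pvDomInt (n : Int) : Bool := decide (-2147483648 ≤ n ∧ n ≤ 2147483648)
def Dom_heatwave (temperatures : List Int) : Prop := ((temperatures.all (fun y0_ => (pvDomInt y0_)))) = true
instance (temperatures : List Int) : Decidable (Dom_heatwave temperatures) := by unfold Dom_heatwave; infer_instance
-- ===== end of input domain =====

-- ===== PORT A =====
-- B replaces A's dual-counter scan by a split into maximal hot runs; return-value equivalence.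
-- A: one scan with two counters (hot-streak length, days >= 30 in the streak),
-- reset on a cold day, early-return check before each element.
def heatwaveLoop : List Int → Int → Int → Bool
  | [], count25, count30 => if 5 ≤ count25 ∧ 3 ≤ count30 then true else false
  | temp :: rest, count25, count30 =>
    if 5 ≤ count25 ∧ 3 ≤ count30 then true
    else if 25 ≤ temp ∧ temp < 30 then heatwaveLoop rest (count25 + 1) count30
    else if 30 ≤ temp then heatwaveLoop rest (count25 + 1) (count30 + 1)
    else heatwaveLoop rest 0 0

def heatwave (temperatures : List Int) : Bool :=
  heatwaveLoop temperatures 0 0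

-- ===== PORT B =====
-- B: groupby on the key (t >= 25): walk the list; at a hot head materialize the
-- maximal hot run, test it, and continue after the run; a cold day is skipped.
def pvHot (t : Int) : Bool := 25 ≤ t

def pvQualifies (run : List Int) : Bool :=
  5 ≤ run.length && 3 ≤ run.countP (fun t => 30 ≤ t)

def heatwave_alt : List Int → Bool
  | [] => false
  | t :: ts =>
    if pvHot t then
      if pvQualifies (t :: ts.takeWhile pvHot) then true
      else heatwave_alt (ts.dropWhile pvHot)
    else heatwave_alt ts
termination_by l => l.length
decreasing_by
  all_goals simp only [List.length_cons]
  · exact Nat.lt_succ_of_le (List.Sublist.length_le (List.dropWhile_sublist (p := pvHot) (l := ts)))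
  · omega

-- ===== PRECONDITION & SPEC =====
def Spec_heatwave (temperatures : List Int) (out : Bool) : Prop := out = heatwave_alt temperatures
instance (temperatures : List Int) (out : Bool) : Decidable (Spec_heatwave temperatures out) := by unfold Spec_heatwave; infer_instance

-- ===== CLAIM (what is proved, stated in full; the proofs are below) =====
def Claim_equal_heatwave : Prop := ∀ (temperatures : List Int), Dom_heatwave temperatures → Spec_heatwave temperatures (heatwave temperatures)

-- ===== LEMMAS AND PROOFS =====

theorem or_congr_decide {a b c d : Prop} [Decidable a] [Decidable b] [Decidable c] [Decidable d]
    (x : Bool) (h : (a ∧ b) ↔ (c ∧ d)) :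
    ((decide a && decide b) || x) = ((decide c && decide d) || x) := by
  rw [← Bool.decide_and, ← Bool.decide_and, decide_eq_decide.mpr h]

theorem alt_nil : heatwave_alt [] = false := by
  rw [heatwave_alt.eq_def]

theorem alt_cold (t : Int) (ts : List Int) (h : pvHot t = false) :
    heatwave_alt (t :: ts) = heatwave_alt ts := by
  rw [heatwave_alt.eq_def]
  simp [h]

theorem alt_hot (t : Int) (ts : List Int) (h : pvHot t = true) :
    heatwave_alt (t :: ts) =
      (pvQualifies (t :: ts.takeWhile pvHot) || heatwave_alt (ts.dropWhile pvHot)) := by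
  rw [heatwave_alt.eq_def]
  simp only [h, if_true]
  cases hq : pvQualifies (t :: ts.takeWhile pvHot) <;> simp

-- One step of B: peel the maximal hot run off the front.
theorem alt_peel (l : List Int) :
    heatwave_alt l =
      (pvQualifies (l.takeWhile pvHot) || heatwave_alt (l.dropWhile pvHot)) := by
  cases l with
  | nil => simp [alt_nil, pvQualifies]
  | cons t ts =>
    cases h : pvHot t
    · rw [alt_cold t ts h,
        show (t :: ts).takeWhile pvHot = [] from by simp [h],
        show (t :: ts).dropWhile pvHot = t :: ts from by simp [h],
        alt_cold t ts h]
      simp [pvQualifies]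
    · rw [show (t :: ts).takeWhile pvHot = t :: ts.takeWhile pvHot from by
          simp [h],
        show (t :: ts).dropWhile pvHot = ts.dropWhile pvHot from by
          simp [h]]
      exact alt_hot t ts h

-- Main invariant: A's loop, with the counters of the current partial hot run,
-- equals B's verdict on the completion of that run followed by the rest.
theorem loop_eq (l : List Int) : ∀ c25 c30 : Int,
    heatwaveLoop l c25 c30 =
      ((decide (5 ≤ c25 + ((l.takeWhile pvHot).length : Int)) &&
        decide (3 ≤ c30 + ((l.takeWhile pvHot).countP (fun t => 30 ≤ t) : Int))) ||
       heatwave_alt (l.dropWhile pvHot)) := by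
  induction l with
  | nil =>
    intro c25 c30
    simp only [heatwaveLoop, List.takeWhile_nil, List.dropWhile_nil, List.length_nil,
      List.countP_nil, Nat.cast_zero, add_zero, alt_nil, Bool.or_false]
    by_cases h5 : (5 : Int) ≤ c25 <;> by_cases h3 : (3 : Int) ≤ c30 <;> simp [h5, h3]
  | cons t ts ih =>
    intro c25 c30
    simp only [heatwaveLoop]
    by_cases hc : (5 ≤ c25 ∧ 3 ≤ c30)
    · rw [if_pos hc]
      have h5 := hc.1
      have h3 := hc.2
      have hA : decide (5 ≤ c25 + (((t :: ts).takeWhile pvHot).length : Int)) = true := by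
        rw [decide_eq_true_eq]; omega
      have hB : decide (3 ≤ c30 + (((t :: ts).takeWhile pvHot).countP (fun t => 30 ≤ t) : Int))
          = true := by
        rw [decide_eq_true_eq]; omega
      simp [hA, hB]
    · rw [if_neg hc]
      by_cases hm : (25 ≤ t ∧ t < 30)
      · rw [if_pos hm, ih]
        have hhot : pvHot t = true := by
          simp only [pvHot, decide_eq_true_eq]; omega
        have h30 : decide ((30 : Int) ≤ t) = false := by
          rw [decide_eq_false_iff_not]; omega
        simp only [List.takeWhile_cons, List.dropWhile_cons, hhot, if_true, List.length_cons,
          List.countP_cons, h30]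
        exact or_congr_decide _ (by push_cast; omega)
      · rw [if_neg hm]
        by_cases hw : (30 : Int) ≤ t
        · rw [if_pos hw, ih]
          have hhot : pvHot t = true := by
            simp only [pvHot, decide_eq_true_eq]; omega
          have h30 : decide ((30 : Int) ≤ t) = true := by
            rw [decide_eq_true_eq]; omega
          simp only [List.takeWhile_cons, List.dropWhile_cons, hhot, if_true, List.length_cons,
            List.countP_cons, h30]
          exact or_congr_decide _ (by push_cast; omega)
        · rw [if_neg hw, ih]
          have hcold : pvHot t = false := by
            simp only [pvHot, decide_eq_false_iff_not]; omega
          rw [show (t :: ts).takeWhile pvHot = [] from by simp [hcold],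
            show (t :: ts).dropWhile pvHot = t :: ts from by simp [hcold],
            alt_cold t ts hcold, alt_peel ts]
          have hAB : (decide ((5 : Int) ≤ c25 + (([] : List Int).length : Int)) &&
              decide ((3 : Int) ≤ c30 + ((([] : List Int).countP (fun t => 30 ≤ t)) : Int)))
              = false := by
            rw [← Bool.decide_and, decide_eq_false_iff_not]
            simp only [List.length_nil, List.countP_nil, Nat.cast_zero, add_zero]
            omega
          rw [hAB, Bool.false_or]
          simp only [pvQualifies]
          exact or_congr_decide _ (by omega)

-- ===== VERDICT (by name: the statement is the Claim_ definition above) =====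
theorem heatwave_spec : Claim_equal_heatwave := by
  intro l _
  unfold Spec_heatwave heatwave
  rw [loop_eq, alt_peel l]
  simp only [pvQualifies]
  exact or_congr_decide _ (by omega)
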